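-- pv_equiv track=rewrite | github.com/aww/adventofcode | 2023/day10_pipes.py | find_inside_outside
-- ===== SOURCE A (Python) =====
-- def negv(v: tuple[int, int]) -> tuple[int, int]:
--     return -v[0], -v[1]
--
-- def addv(a: tuple[int, int], b: tuple[int, int]) -> tuple[int, int]:
--     return a[0] + b[0], a[1] + b[1]
--
-- def infer_start_flag(loop) -> str:
--     # This trick computes directions the loop goes from the start
--     # Then it project the four possible directions to the integers 0, 1, 2, 3 with
--     # [dir . (1,3) + 3] // 2
--     # ( 0, 1) -> 3
--     # ( 0,-1) -> 0
--     # ( 1, 0) -> 2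
--     # (-1, 0) -> 1
--     dir1 = addv(loop[1], negv(loop[0]))
--     prj1 = (dir1[0] + 3*dir1[1] + 3) // 2
--     dir2 = addv(loop[-1], negv(loop[0]))
--     prj2 = (dir2[0] + 3*dir2[1] + 3) // 2
--     # |=2,1  -=3,0   J=1,0   L=1,3   F=2,3   7=0,2
--     flag = ' J7-J |L7| F-LF -'[prj1 + 4*prj2]
--     return flag
--
-- def find_inside_outside(field: list[list[str]], loop: list[tuple[int, int]]) -> list[list[int]]:
--     winding = 0
--     nrows, ncols = len(field), len(field[0])
--     marks = [[0 for _ in range(ncols)] for _ in range(nrows)]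
--     for i in range(nrows):
--         crossing_count = 0
--         for j in range(ncols):
--             if (i, j) in loop:
--                 flag = field[i][j]
--                 # We are going to use some tricks here but the basic idea is to scan across
--                 # each row and keep track of how often we cross the loop.
--                 # It is easy for | but for the "corners" we want to count sequences like
--                 #   L---J or F---7
--                 # as not crossing but count sequences like
--                 #   L-*7 or F-*J
--                 # as crossing. Other patterns should not occur.
--                 # The start flag is also tricky because we need infer what shape it has.
--                 #
--                 # FUTURE IDEA: simplify this with re.sub
--                 if flag == 'S':
--                     # Have to infer what this is
--                     flag = infer_start_flag(loop)
--                 if flag == '|':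
--                     crossing_count += 2
--                 elif flag == 'L':   # LJ, F7 = 0   L7, FJ = 1
--                     crossing_count += 2
--                 elif flag == 'J':
--                     crossing_count += 2
--             else:
--                 marks[i][j] = (crossing_count % 4) - 1
--     return marks
-- ===== SOURCE B (Python) =====
-- # B: two-phase re-implementation. Phase 1 walks the LOOP list once (as a set) and
-- # builds, per row, the sorted list of columns whose resolved pipe is north-connecting
-- # ('|', 'L', 'J'); phase 2 fills each row with a pointer into that column list, so no
-- # per-cell scan of the loop list and no running crossing counter remain.
--
-- def _start_flag(loop):
--     y0, x0 = loop[0]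
--     y1, x1 = loop[1]
--     yl, xl = loop[-1]
--     prj1 = ((y1 - y0) + 3 * (x1 - x0) + 3) // 2
--     prj2 = ((yl - y0) + 3 * (xl - x0) + 3) // 2
--     return ' J7-J |L7| F-LF -'[prj1 + 4 * prj2]
--
-- def find_inside_outside(field, loop):
--     nrows, ncols = len(field), len(field[0])
--     loop_set = set(loop)
--     cross = [[] for _ in range(nrows)]
--     for (i, j) in loop_set:
--         if 0 <= i < nrows and 0 <= j < ncols:
--             c = field[i][j]
--             if c == 'S':
--                 c = _start_flag(loop)
--             if c in ('|', 'L', 'J'):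
--                 cross[i].append(j)
--     marks = []
--     for i in range(nrows):
--         cols = sorted(cross[i])
--         p = 0
--         row = []
--         for j in range(ncols):
--             while p < len(cols) and cols[p] < j:
--                 p += 1
--             row.append(0 if (i, j) in loop_set else (1 if p % 2 else -1))
--         marks.append(row)
--     return marks
-- ===== Notes on version B (the rewrite author's own statement) =====
-- stated objective: faster
-- what changed: A scans every grid cell doing an O(|loop|) list-membership test while threading a running crossing counter; B builds the loop set once, makes one pass over it to index the sorted north-connecting ('|','L','J') columns per row, then fills each row with a pointer into that column list, so no per-cell loop scan and no counter remain.
import Mathlib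
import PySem

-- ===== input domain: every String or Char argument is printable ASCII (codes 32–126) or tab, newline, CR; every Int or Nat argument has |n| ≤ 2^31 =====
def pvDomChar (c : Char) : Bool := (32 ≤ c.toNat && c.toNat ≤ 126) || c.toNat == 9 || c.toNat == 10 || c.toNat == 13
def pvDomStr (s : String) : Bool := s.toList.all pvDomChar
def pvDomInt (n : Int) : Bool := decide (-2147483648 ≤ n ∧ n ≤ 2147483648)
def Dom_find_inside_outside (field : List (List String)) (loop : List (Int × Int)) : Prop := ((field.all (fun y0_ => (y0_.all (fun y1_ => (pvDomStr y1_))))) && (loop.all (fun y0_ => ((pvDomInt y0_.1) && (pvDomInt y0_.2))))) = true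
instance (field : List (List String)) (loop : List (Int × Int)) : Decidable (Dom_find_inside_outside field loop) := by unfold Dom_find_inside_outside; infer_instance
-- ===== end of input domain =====

-- B replaces A's per-cell loop-list scan + running crossing counter by a one-pass per-row
-- table of sorted north-connecting columns and a pointer-driven row fill (measured faster).

-- ===== PORT A =====
def pvTable : String := " J7-J |L7| F-LF -"

def inferStartFlag (loop : List (Int × Int)) : String :=
  let p0 := (PySem.List.pyGet? loop 0).getD (0, 0)
  let p1 := (PySem.List.pyGet? loop 1).getD (0, 0)
  let pl := (PySem.List.pyGet? loop (-1)).getD (0, 0)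
  let dir1 := (p1.1 + -p0.1, p1.2 + -p0.2)
  let prj1 := PySem.Int.floordiv (dir1.1 + 3 * dir1.2 + 3) 2
  let dir2 := (pl.1 + -p0.1, pl.2 + -p0.2)
  let prj2 := PySem.Int.floordiv (dir2.1 + 3 * dir2.2 + 3) 2
  ((PySem.Str.pyGet? pvTable (prj1 + 4 * prj2)).map (fun c => String.ofList [c])).getD ""

-- flag = field[i][j]; if flag == 'S': flag = infer_start_flag(loop)
def resolveA (field : List (List String)) (loop : List (Int × Int)) (i j : Nat) : String :=
  let flag := (field.getD i []).getD j ""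
  if flag = "S" then inferStartFlag loop else flag

def stepA (field : List (List String)) (loop : List (Int × Int)) (i : Nat)
    (st : Int × List Int) (j : Nat) : Int × List Int :=
  if ((i : Int), (j : Int)) ∈ loop then
    if resolveA field loop i j = "|" then (st.1 + 2, st.2 ++ [0])
    else if resolveA field loop i j = "L" then (st.1 + 2, st.2 ++ [0])
    else if resolveA field loop i j = "J" then (st.1 + 2, st.2 ++ [0])
    else (st.1, st.2 ++ [0])
  else (st.1, st.2 ++ [PySem.Int.mod st.1 4 - 1])

def find_inside_outside (field : List (List String)) (loop : List (Int × Int)) : List (List Int) :=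
  let nrows := field.length
  let ncols := (field.headD []).length
  (List.range nrows).map (fun i =>
    ((List.range ncols).foldl (stepA field loop i) ((0 : Int), ([] : List Int))).2)

-- ===== PORT B =====
def altStartFlag (loop : List (Int × Int)) : String :=
  let p0 := (PySem.List.pyGet? loop 0).getD (0, 0)
  let p1 := (PySem.List.pyGet? loop 1).getD (0, 0)
  let pl := (PySem.List.pyGet? loop (-1)).getD (0, 0)
  let prj1 := PySem.Int.floordiv ((p1.1 - p0.1) + 3 * (p1.2 - p0.2) + 3) 2
  let prj2 := PySem.Int.floordiv ((pl.1 - p0.1) + 3 * (pl.2 - p0.2) + 3) 2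
  ((PySem.Str.pyGet? pvTable (prj1 + 4 * prj2)).map (fun c => String.ofList [c])).getD ""

def altCross (field : List (List String)) (loop : List (Int × Int)) (i j : Int) : Bool :=
  let c0 := (PySem.List.pyGet? ((PySem.List.pyGet? field i).getD []) j).getD ""
  let c := if c0 = "S" then altStartFlag loop else c0
  c = "|" || c = "L" || c = "J"

def altTable (field : List (List String)) (loop : List (Int × Int)) (nrows ncols : Nat) : List (List Int) :=
  (PySem.Set.ofList loop).foldl (fun (cr : List (List Int)) (p : Int × Int) =>
    if 0 ≤ p.1 ∧ p.1 < (nrows : Int) ∧ 0 ≤ p.2 ∧ p.2 < (ncols : Int) then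
      if altCross field loop p.1 p.2 then cr.modify p.1.toNat (· ++ [p.2]) else cr
    else cr) (List.replicate nrows [])

def pvAdvance (cols : List Int) (j : Int) (p : Nat) : Nat :=
  if h : p < cols.length then
    if cols[p] < j then pvAdvance cols j (p + 1) else p
  else p
termination_by cols.length - p

def altFill (lset : List (Int × Int)) (cols : List Int) (i : Nat)
    (st : Nat × List Int) (j : Nat) : Nat × List Int :=
  let p := pvAdvance cols (j : Int) st.1
  (p, st.2 ++ [if ((i : Int), (j : Int)) ∈ lset then 0 else if p % 2 = 1 then 1 else -1])

def find_inside_outside_alt (field : List (List String)) (loop : List (Int × Int)) : List (List Int) :=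
  let nrows := field.length
  let ncols := (field.headD []).length
  let lset := PySem.Set.ofList loop
  let cross := altTable field loop nrows ncols
  (List.range nrows).map (fun i =>
    let cols := PySem.List.sorted (cross.getD i []) (fun x => x)
    ((List.range ncols).foldl (altFill lset cols i) ((0 : Nat), ([] : List Int))).2)

-- ===== PRECONDITION & SPEC =====
-- Pre_ excludes exactly the inputs on which the Python A raises: an empty field
-- (len(field[0]) → IndexError), a loop cell inside the first-row-width grid whose row is
-- too short (field[i][j] → IndexError), and an 'S' loop cell whose inferred table index
-- needs loop[1] (len(loop) < 2 → IndexError) or falls outside the 17-char table.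
def pvStartIdx (loop : List (Int × Int)) : Int :=
  let p0 := (PySem.List.pyGet? loop 0).getD (0, 0)
  let p1 := (PySem.List.pyGet? loop 1).getD (0, 0)
  let pl := (PySem.List.pyGet? loop (-1)).getD (0, 0)
  PySem.Int.floordiv ((p1.1 - p0.1) + 3 * (p1.2 - p0.2) + 3) 2 +
    4 * PySem.Int.floordiv ((pl.1 - p0.1) + 3 * (pl.2 - p0.2) + 3) 2

def Pre_find_inside_outside (field : List (List String)) (loop : List (Int × Int)) : Prop :=
  field ≠ [] ∧
  ∀ i ∈ List.range field.length, ∀ j ∈ List.range (field.headD []).length,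
    ((i : Int), (j : Int)) ∈ loop →
      j < (field.getD i []).length ∧
      ((field.getD i []).getD j "" = "S" →
        2 ≤ loop.length ∧ -17 ≤ pvStartIdx loop ∧ pvStartIdx loop < 17)

instance (field : List (List String)) (loop : List (Int × Int)) : Decidable (Pre_find_inside_outside field loop) := by
  unfold Pre_find_inside_outside; infer_instance

def pvWitness_find_inside_outside : List (List String) × (List (Int × Int)) :=
  ([["F", "7", "."], ["L", "J", "."]], [(0, 0), (0, 1), (1, 1), (1, 0)])

def Spec_find_inside_outside (field : List (List String)) (loop : List (Int × Int)) (out : List (List Int)) : Prop := out = find_inside_outside_alt field loop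
instance (field : List (List String)) (loop : List (Int × Int)) (out : List (List Int)) : Decidable (Spec_find_inside_outside field loop out) := by unfold Spec_find_inside_outside; infer_instance

-- ===== CLAIM (what is proved, stated in full; the proofs are below) =====
def Claim_equal_find_inside_outside : Prop := ∀ (field : List (List String)) (loop : List (Int × Int)), Dom_find_inside_outside field loop → Pre_find_inside_outside field loop → Spec_find_inside_outside field loop (find_inside_outside field loop)

-- ===== LEMMAS AND PROOFS =====

-- The canonical crossing predicate: loop cell whose resolved pipe is north-connecting.
def crossP (field : List (List String)) (loop : List (Int × Int)) (i j : Nat) : Bool :=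
  decide (((i : Int), (j : Int)) ∈ loop) &&
    (resolveA field loop i j = "|" || resolveA field loop i j = "L" || resolveA field loop i j = "J")

-- number of crossing cells of row i strictly left of column n
def cntA (field : List (List String)) (loop : List (Int × Int)) (i n : Nat) : Nat :=
  (List.range n).countP (crossP field loop i)

theorem altStartFlag_eq (loop : List (Int × Int)) : altStartFlag loop = inferStartFlag loop := by
  simp [altStartFlag, inferStartFlag, Int.sub_eq_add_neg]

theorem altCross_eq (field : List (List String)) (loop : List (Int × Int)) (i j : Nat) :
    altCross field loop (i : Int) (j : Int) =
      (resolveA field loop i j = "|" || resolveA field loop i j = "L" || resolveA field loop i j = "J") := by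
  simp [altCross, resolveA, altStartFlag_eq, List.getD_eq_getElem?_getD]

theorem A_row (field : List (List String)) (loop : List (Int × Int)) (i : Nat) :
    ∀ n, (List.range n).foldl (stepA field loop i) ((0 : Int), ([] : List Int)) =
      ((2 * cntA field loop i n : Int),
        (List.range n).map (fun (j : Nat) =>
          if ((i : Int), (j : Int)) ∈ loop then 0
          else PySem.Int.mod (2 * cntA field loop i j) 4 - 1)) := by
  intro n
  induction n with
  | zero => simp [cntA]
  | succ n ih =>
    rw [List.range_succ, List.foldl_append, List.map_append, ih]
    simp only [List.foldl_cons, List.foldl_nil, List.map_cons, List.map_nil]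
    have hcnt : cntA field loop i (n + 1) =
        cntA field loop i n + (if crossP field loop i n = true then 1 else 0) := by
      simp [cntA, List.range_succ, List.countP_append, List.countP_cons]
    unfold stepA
    by_cases hm : ((i : Int), (n : Int)) ∈ loop
    · rw [if_pos hm]
      have hcp : crossP field loop i n = (resolveA field loop i n = "|" ||
          resolveA field loop i n = "L" || resolveA field loop i n = "J") := by
        simp [crossP, hm]
      by_cases h1 : resolveA field loop i n = "|"
      · simp only [h1, hcnt, hcp, hm]
        simp [Prod.mk.injEq]
        ring
      · by_cases h2 : resolveA field loop i n = "L"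
        · simp only [h2, hcnt, hcp, hm]
          simp [Prod.mk.injEq]
          ring
        · by_cases h3 : resolveA field loop i n = "J"
          · simp only [h3, hcnt, hcp, hm]
            simp [Prod.mk.injEq]
            ring
          · simp only [hcnt, hcp, hm]
            simp [h1, h2, h3]
    · rw [if_neg hm]
      have hcp : crossP field loop i n = false := by simp [crossP, hm]
      simp [hcnt, hcp, hm]

theorem advance_eq (cols : List Int) (hs : cols.Pairwise (· ≤ ·)) (j : Int) :
    ∀ p, pvAdvance cols j p = p + ((cols.drop p).countP (fun c => decide (c < j))) := by
  suffices H : ∀ fuel p, cols.length - p ≤ fuel →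
      pvAdvance cols j p = p + ((cols.drop p).countP (fun c => decide (c < j))) by
    intro p; exact H _ p le_rfl
  intro fuel
  induction fuel with
  | zero =>
    intro p hp
    rw [pvAdvance]
    have h : ¬ p < cols.length := by omega
    simp [h, List.drop_eq_nil_of_le (by omega : cols.length ≤ p)]
  | succ f ihf =>
    intro p hp
    rw [pvAdvance]
    by_cases h : p < cols.length
    · have hdrop : cols.drop p = cols[p] :: cols.drop (p + 1) :=
        List.drop_eq_getElem_cons h
      have hs' : (cols.drop p).Pairwise (· ≤ ·) := hs.sublist (List.drop_sublist _ _)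
      rw [hdrop] at hs'
      have hall : ∀ a ∈ cols.drop (p + 1), cols[p] ≤ a := (List.pairwise_cons.mp hs').1
      by_cases hc : cols[p] < j
      · rw [dif_pos h, if_pos hc, ihf (p + 1) (by omega)]
        have hcc : (cols.drop p).countP (fun c => decide (c < j)) =
            (cols.drop (p + 1)).countP (fun c => decide (c < j)) + 1 := by
          rw [hdrop, List.countP_cons]
          simp [hc]
        omega
      · rw [dif_pos h, if_neg hc]
        have hz : (cols.drop (p + 1)).countP (fun c => decide (c < j)) = 0 := by
          rw [List.countP_eq_zero]
          intro a ha
          have := hall a ha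
          simp only [decide_eq_true_eq]
          omega
        have hcc : (cols.drop p).countP (fun c => decide (c < j)) = 0 := by
          rw [hdrop, List.countP_cons, hz]
          simp [hc]
        omega
    · rw [dif_neg h]
      simp [List.drop_eq_nil_of_le (by omega : cols.length ≤ p)]

theorem count_split (cols : List Int) (hs : cols.Pairwise (· ≤ ·)) (x y : Int) (hxy : x ≤ y) :
    cols.countP (fun c => decide (c < y)) =
      cols.countP (fun c => decide (c < x)) +
        (cols.drop (cols.countP (fun c => decide (c < x)))).countP (fun c => decide (c < y)) := by
  induction cols with
  | nil => simp
  | cons a l ih =>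
    obtain ⟨ha, hl⟩ := List.pairwise_cons.mp hs
    by_cases hax : a < x
    · have hay : a < y := lt_of_lt_of_le hax hxy
      have ihh := ih hl
      simp only [List.countP_cons]
      simp [hax, hay]
      omega
    · have h0 : l.countP (fun c => decide (c < x)) = 0 := by
        rw [List.countP_eq_zero]
        intro c hc
        have := ha c hc
        simp only [decide_eq_true_eq]
        omega
      have haxd : (decide (a < x)) = false := by simp [hax]
      simp only [List.countP_cons, haxd, h0]
      simp [List.countP_cons]

-- state of B's fill loop before processing column n
def kkB (cols : List Int) : Nat → Nat
  | 0 => 0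
  | n + 1 => cols.countP (fun c => decide (c < (n : Int)))

theorem B_row (lset : List (Int × Int)) (cols : List Int) (i : Nat)
    (hs : cols.Pairwise (· ≤ ·)) :
    ∀ n, (List.range n).foldl (altFill lset cols i) ((0 : Nat), ([] : List Int)) =
      (kkB cols n,
        (List.range n).map (fun (j : Nat) =>
          if ((i : Int), (j : Int)) ∈ lset then 0
          else if (cols.countP (fun c => decide (c < (j : Int)))) % 2 = 1 then 1 else -1)) := by
  intro n
  induction n with
  | zero => simp [kkB]
  | succ n ih =>
    rw [List.range_succ, List.foldl_append, List.map_append, ih]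
    simp only [List.foldl_cons, List.foldl_nil, List.map_cons, List.map_nil]
    unfold altFill
    have hadv : pvAdvance cols (n : Int) (kkB cols n) =
        cols.countP (fun c => decide (c < (n : Int))) := by
      rw [advance_eq cols hs (n : Int)]
      match n with
      | 0 => simp [kkB]
      | Nat.succ m =>
        simp only [kkB]
        have hcast : ((m + 1 : Nat) : Int) = (m : Int) + 1 := by push_cast; ring
        rw [hcast]
        exact (count_split cols hs (m : Int) ((m : Int) + 1) (by omega)).symm
    simp only [hadv]
    simp [kkB]

theorem table_getD (field : List (List String)) (loop : List (Int × Int)) (nrows ncols : Nat)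
    (i : Nat) (hi : i < nrows) :
    (altTable field loop nrows ncols).getD i [] =
      ((PySem.Set.ofList loop).filter (fun p =>
        decide (0 ≤ p.1 ∧ p.1 < (nrows : Int) ∧ 0 ≤ p.2 ∧ p.2 < (ncols : Int)) &&
          altCross field loop p.1 p.2 && (p.1 == (i : Int)))).map (·.2) := by
  have aux : ∀ (xs : List (Int × Int)) (cr : List (List Int)), cr.length = nrows →
      ((xs.foldl (fun (cr : List (List Int)) (p : Int × Int) =>
        if 0 ≤ p.1 ∧ p.1 < (nrows : Int) ∧ 0 ≤ p.2 ∧ p.2 < (ncols : Int) then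
          if altCross field loop p.1 p.2 then cr.modify p.1.toNat (· ++ [p.2]) else cr
        else cr) cr).getD i []) =
      cr.getD i [] ++ ((xs.filter (fun p =>
        decide (0 ≤ p.1 ∧ p.1 < (nrows : Int) ∧ 0 ≤ p.2 ∧ p.2 < (ncols : Int)) &&
          altCross field loop p.1 p.2 && (p.1 == (i : Int)))).map (·.2)) := by
    intro xs
    induction xs with
    | nil => intro cr _; simp
    | cons p xs ih =>
      intro cr hlen
      simp only [List.foldl_cons, List.filter_cons]
      by_cases hg : 0 ≤ p.1 ∧ p.1 < (nrows : Int) ∧ 0 ≤ p.2 ∧ p.2 < (ncols : Int)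
      · by_cases hc : altCross field loop p.1 p.2
        · rw [if_pos hg, if_pos hc, ih _ (by simp [hlen])]
          by_cases hpi : p.1 = (i : Int)
          · have htn : p.1.toNat = i := by omega
            have hilt : i < cr.length := by omega
            have hmod : (cr.modify p.1.toNat (· ++ [p.2])).getD i [] = cr.getD i [] ++ [p.2] := by
              rw [htn]
              simp [List.getD_eq_getElem?_getD, List.getElem?_eq_getElem hilt]
            have hb1 : decide (0 ≤ p.1 ∧ p.1 < (nrows : Int) ∧ 0 ≤ p.2 ∧ p.2 < (ncols : Int)) = true :=
              decide_eq_true hg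
            have hb3 : (p.1 == (i : Int)) = true := by simp [hpi]
            rw [hmod, if_pos (show (decide (0 ≤ p.1 ∧ p.1 < (nrows : Int) ∧ 0 ≤ p.2 ∧ p.2 < (ncols : Int)) &&
                altCross field loop p.1 p.2 && (p.1 == (i : Int))) = true by rw [hb1, hc, hb3]; rfl)]
            simp [List.append_assoc]
          · have htn : p.1.toNat ≠ i := by omega
            have hmod : (cr.modify p.1.toNat (· ++ [p.2])).getD i [] = cr.getD i [] := by
              simp [List.getD_eq_getElem?_getD, htn]
            have hb3 : (p.1 == (i : Int)) = false := by simp [hpi]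
            rw [hmod, if_neg (show ¬ ((decide (0 ≤ p.1 ∧ p.1 < (nrows : Int) ∧ 0 ≤ p.2 ∧ p.2 < (ncols : Int)) &&
                altCross field loop p.1 p.2 && (p.1 == (i : Int))) = true) from fun h => by
              rw [hb3, Bool.and_false] at h; exact Bool.false_ne_true h)]
        · have hcf : altCross field loop p.1 p.2 = false := by
            cases hAC : altCross field loop p.1 p.2
            · rfl
            · exact absurd hAC hc
          rw [if_pos hg, if_neg hc, ih _ hlen,
            if_neg (show ¬ ((decide (0 ≤ p.1 ∧ p.1 < (nrows : Int) ∧ 0 ≤ p.2 ∧ p.2 < (ncols : Int)) &&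
                altCross field loop p.1 p.2 && (p.1 == (i : Int))) = true) from fun h => by
              rw [hcf, Bool.and_false, Bool.false_and] at h; exact Bool.false_ne_true h)]
      · have hgf : decide (0 ≤ p.1 ∧ p.1 < (nrows : Int) ∧ 0 ≤ p.2 ∧ p.2 < (ncols : Int)) = false :=
          decide_eq_false hg
        rw [if_neg hg, ih _ hlen,
          if_neg (show ¬ ((decide (0 ≤ p.1 ∧ p.1 < (nrows : Int) ∧ 0 ≤ p.2 ∧ p.2 < (ncols : Int)) &&
              altCross field loop p.1 p.2 && (p.1 == (i : Int))) = true) from fun h => by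
            rw [hgf, Bool.false_and, Bool.false_and] at h; exact Bool.false_ne_true h)]
  unfold altTable
  rw [aux _ _ (by simp)]
  simp [List.getD_eq_getElem?_getD, hi]

theorem cols_eq (field : List (List String)) (loop : List (Int × Int)) (i : Nat)
    (hi : i < field.length) :
    PySem.List.sorted ((altTable field loop field.length (field.headD []).length).getD i []) (fun x => x) =
      ((List.range (field.headD []).length).filter (crossP field loop i)).map (fun (j : Nat) => (j : Int)) := by
  apply PySem.List.sorted_eq_of_perm_of_pairwise_lt
  · rw [table_getD field loop field.length (field.headD []).length i hi]
    refine (List.perm_ext_iff_of_nodup ?_ ?_).mpr ?_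
    · exact (List.nodup_range.filter _).map Nat.cast_injective
    · refine List.Nodup.map_on ?_ ((PySem.Set.nodup_ofList loop).filter _)
      intro p hp q hq hpq
      have hp1 : p.1 = (i : Int) := by
        have := (List.mem_filter.mp hp).2
        simp only [Bool.and_eq_true, beq_iff_eq] at this
        exact this.2
      have hq1 : q.1 = (i : Int) := by
        have := (List.mem_filter.mp hq).2
        simp only [Bool.and_eq_true, beq_iff_eq] at this
        exact this.2
      cases p; cases q; simp_all
    · intro x
      constructor
      · intro hx
        obtain ⟨j', hj', rfl⟩ := List.mem_map.mp hx
        obtain ⟨hjr, hcp⟩ := List.mem_filter.mp hj'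
        have hjn : j' < (field.headD []).length := List.mem_range.mp hjr
        simp only [crossP, Bool.and_eq_true, decide_eq_true_eq] at hcp
        apply List.mem_map.mpr
        refine ⟨((i : Int), (j' : Int)), List.mem_filter.mpr ⟨?_, ?_⟩, rfl⟩
        · exact (PySem.Set.mem_ofList loop _).mpr hcp.1
        · simp only [Bool.and_eq_true, beq_iff_eq, decide_eq_true_eq]
          refine ⟨⟨?_, ?_⟩, by simp⟩
          · refine ⟨by omega, by exact_mod_cast hi, by omega, by exact_mod_cast hjn⟩
          · rw [altCross_eq]
            exact hcp.2
      · intro hx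
        obtain ⟨p, hp, rfl⟩ := List.mem_map.mp hx
        obtain ⟨hpl, hpred⟩ := List.mem_filter.mp hp
        simp only [Bool.and_eq_true, beq_iff_eq, decide_eq_true_eq] at hpred
        obtain ⟨⟨hb, hcr⟩, hp1⟩ := hpred
        have h2 : ((p.2.toNat : Nat) : Int) = p.2 := by omega
        apply List.mem_map.mpr
        refine ⟨p.2.toNat, List.mem_filter.mpr ⟨List.mem_range.mpr (by omega), ?_⟩, h2⟩
        simp only [crossP, Bool.and_eq_true, decide_eq_true_eq]
        constructor
        · have hpe : ((i : Int), ((p.2.toNat : Nat) : Int)) = p := by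
            cases p
            simp only [Prod.mk.injEq]
            constructor
            · exact hp1.symm
            · simpa using h2
          rw [hpe]
          exact (PySem.Set.mem_ofList loop p).mp hpl
        · rw [hp1, ← h2] at hcr
          rw [altCross_eq] at hcr
          exact hcr
  · apply List.Pairwise.map
    · intro a b hab
      exact_mod_cast hab
    · exact List.Pairwise.filter _ (List.pairwise_lt_range)

theorem count_cols (field : List (List String)) (loop : List (Int × Int)) (i : Nat)
    (j : Nat) (hj : j ≤ (field.headD []).length) :
    List.countP (fun c => decide (c < (j : Int)))
        (((List.range (field.headD []).length).filter (crossP field loop i)).map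
          (fun (j' : Nat) => (j' : Int))) =
      cntA field loop i j := by
  rw [List.countP_map, List.countP_filter]
  simp only [Function.comp_def]
  have hsplit : (field.headD []).length = j + ((field.headD []).length - j) := by omega
  rw [hsplit, List.range_add, List.countP_append]
  have h2 : ((List.range ((field.headD []).length - j)).map (fun k => j + k)).countP
      (fun (a : Nat) => decide ((a : Int) < (j : Int)) && crossP field loop i a) = 0 := by
    rw [List.countP_eq_zero]
    intro a ha
    obtain ⟨k, _, rfl⟩ := List.mem_map.mp ha
    simp only [Bool.and_eq_true, decide_eq_true_eq]
    intro h
    have : ((j + k : Nat) : Int) < (j : Int) := h.1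
    omega
  rw [h2, Nat.add_zero]
  unfold cntA
  apply List.countP_congr
  intro a ha
  have haj : a < j := List.mem_range.mp ha
  simp [haj]

theorem mark_parity (c : Nat) :
    PySem.Int.mod (2 * (c : Int)) 4 - 1 = if c % 2 = 1 then (1 : Int) else -1 := by
  rw [PySem.Int.mod_eq_emod_of_pos (by norm_num : (0 : Int) < 4)]
  split_ifs with h <;> omega

theorem find_eq (field : List (List String)) (loop : List (Int × Int)) :
    find_inside_outside field loop = find_inside_outside_alt field loop := by
  unfold find_inside_outside find_inside_outside_alt
  simp only []
  apply List.map_congr_left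
  intro i hi
  have hi' : i < field.length := List.mem_range.mp hi
  rw [cols_eq field loop i hi']
  have hpw : (((List.range (field.headD []).length).filter (crossP field loop i)).map
      (fun (j : Nat) => (j : Int))).Pairwise (· ≤ ·) := by
    apply List.Pairwise.map
    · intro a b hab
      exact_mod_cast Nat.le_of_lt hab
    · exact List.Pairwise.filter _ (List.pairwise_lt_range)
  rw [A_row, B_row _ _ _ hpw]
  simp only []
  apply List.map_congr_left
  intro j hj
  have hj' : j < (field.headD []).length := List.mem_range.mp hj
  by_cases hm : ((i : Int), (j : Int)) ∈ loop
  · simp [hm, PySem.Set.mem_ofList]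
  · simp only [PySem.Set.mem_ofList, hm]
    rw [count_cols field loop i j (Nat.le_of_lt hj')]
    rw [mark_parity]

-- ===== VERDICT (by name: the statement is the Claim_ definition above) =====
theorem find_inside_outside_spec : Claim_equal_find_inside_outside := by
  intro field loop _ _
  unfold Spec_find_inside_outside
  exact find_eq field loop
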